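-- pv_equiv track=rewrite | github.com/OropezaHugo/algoritmia2homework | griddy/patopatodragonC.py | evaluate_situation
-- ===== SOURCE A (Python) =====
-- def evaluate_situation(dragons_list, knights_list):
--     if len(knights_list) < len(dragons_list):
--         return -1
--     dragons_list = sorted(dragons_list)
--     knights_list = sorted(knights_list)
--     knight_index = 0
--     result = 0
--     while len(knights_list) - knight_index + 1 >= len(dragons_list) > 0:
--         knight_price = knights_list[knight_index]
--         if knight_price >= dragons_list[0]:
--             result += knight_price
--             knight_index += 1
--             dragons_list.pop(0)
--         else:
--             knight_index += 1
--     if len(dragons_list) > 0: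
--         return -1
--     else:
--         return result
-- ===== SOURCE B (Python) =====
-- def evaluate_situation(dragons_list, knights_list):
--     if len(knights_list) < len(dragons_list):
--         return -1
--     dragons = sorted(dragons_list)
--     i = 0
--     total = 0
--     for price in sorted(knights_list):
--         if i < len(dragons) and price >= dragons[i]:
--             total += price
--             i += 1
--     return total if i == len(dragons) else -1
-- ===== Notes on version B (the rewrite author's own statement) =====
-- stated objective: alternative
-- what changed: Replaces A's while-loop with the odd margin condition len(k)-i+1>=len(d) and its pop(0) on the dragon list by a single two-pointer for-pass over the sorted knights with an integer index into the sorted dragons.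
-- crash fix: A raises IndexError exactly when the greedy matching leaves exactly one dragon unmatched after all knights are used (Pre_ excludes these via a Hall-defect formula); B returns -1 there. — e.g. on evaluate_situation([5], [1]): A raises IndexError, B returns -1
import Mathlib
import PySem

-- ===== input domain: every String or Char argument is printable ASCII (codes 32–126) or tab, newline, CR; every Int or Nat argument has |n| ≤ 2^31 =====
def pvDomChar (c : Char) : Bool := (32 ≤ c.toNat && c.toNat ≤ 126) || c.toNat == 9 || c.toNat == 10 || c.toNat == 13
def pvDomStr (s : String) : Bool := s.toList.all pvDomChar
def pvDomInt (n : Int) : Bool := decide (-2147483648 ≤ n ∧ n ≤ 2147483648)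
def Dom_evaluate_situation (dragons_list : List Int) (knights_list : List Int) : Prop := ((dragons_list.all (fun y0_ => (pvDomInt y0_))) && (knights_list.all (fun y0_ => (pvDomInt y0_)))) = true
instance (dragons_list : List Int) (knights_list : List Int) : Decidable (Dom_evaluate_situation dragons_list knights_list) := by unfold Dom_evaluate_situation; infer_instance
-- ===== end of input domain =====

-- B replaces A's while-loop (with O(d) pop(0) and the margin condition len(k)-i+1>=len(d)) by a
-- single two-pointer pass over the sorted knights with an index into the sorted dragons; equivalence
-- is about the return value (A mutates only its local sorted copies, not the caller's lists).

-- ===== PORT A =====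
-- A's while loop, ported as recursion over the remaining (not yet inspected) knights; `ds` is A's
-- shrinking dragons list (pop(0) = taking the tail), `res` the accumulated result.
def loopA : List Int → List Int → Int → Int
  | _, [], res => res                                   -- loop guard len(ds) > 0 fails → fall through, ds empty → res
  | [], _ :: ds', _ =>
      if ds'.length = 0 then 0                          -- Python: knights_list[knight_index] raises IndexError here (excluded by Pre_); 0 is a dummy
      else -1                                           -- guard fails with dragons left → -1
  | k :: ks', d :: ds', res =>
      if ds'.length ≤ ks'.length + 1 then               -- len(k) - i + 1 >= len(ds)
        if d ≤ k then loopA ks' ds' (res + k)           -- knight_price >= dragons[0]: match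
        else loopA ks' (d :: ds') res                   -- skip this knight
      else -1                                           -- guard fails with dragons left → -1

def evaluate_situation (dragons_list : List Int) (knights_list : List Int) : Int :=
  if knights_list.length < dragons_list.length then -1
  else loopA (PySem.List.sorted knights_list (fun x => x) false)
             (PySem.List.sorted dragons_list (fun x => x) false) 0

-- ===== PORT B =====
-- one foldl over the sorted knights; state = (index into sorted dragons, running total)
def stepB (ds : List Int) (st : Nat × Int) (k : Int) : Nat × Int :=
  if st.1 < ds.length ∧ ds.getD st.1 0 ≤ k then (st.1 + 1, st.2 + k) else st

def evaluate_situation_alt (dragons_list : List Int) (knights_list : List Int) : Int :=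
  if knights_list.length < dragons_list.length then -1
  else
    let ds := PySem.List.sorted dragons_list (fun x => x) false
    let st := (PySem.List.sorted knights_list (fun x => x) false).foldl (stepB ds) (0, 0)
    if st.1 = ds.length then st.2 else -1

-- ===== PRECONDITION & SPEC =====
-- Hall-defect formula: hallDef ks ds = min(|ds|, min over positions i of sorted ds of i + #{k ∈ ks | k ≥ ds[i]});
-- this equals the number of dragons the greedy matching can serve (proved below), stated without running either port.
def hallDef (ks : List Int) : List Int → Nat
  | [] => 0
  | d :: ds => min (ks.countP (fun k => decide (d ≤ k))) (1 + hallDef ks ds)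

-- A raises IndexError exactly when at least one dragon exists, knights are not fewer than dragons,
-- and the greedy matching serves exactly |dragons| - 1 dragons; B returns -1 there.
def Raises_evaluate_situation (dragons_list : List Int) (knights_list : List Int) : Prop :=
  0 < dragons_list.length ∧ dragons_list.length ≤ knights_list.length ∧
    hallDef knights_list (PySem.List.sorted dragons_list (fun x => x) false) = dragons_list.length - 1

instance (dragons_list : List Int) (knights_list : List Int) : Decidable (Raises_evaluate_situation dragons_list knights_list) := by
  unfold Raises_evaluate_situation; infer_instance

-- Pre_ excludes exactly the inputs on which the Python A raises IndexError (see Raises_ above).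
def Pre_evaluate_situation (dragons_list : List Int) (knights_list : List Int) : Prop :=
  ¬ Raises_evaluate_situation dragons_list knights_list

instance (dragons_list : List Int) (knights_list : List Int) : Decidable (Pre_evaluate_situation dragons_list knights_list) := by
  unfold Pre_evaluate_situation; infer_instance

def pvWitness_evaluate_situation : List Int × List Int := ([2], [3])

def pvRaiseWitness_evaluate_situation : List Int × List Int := ([5], [1])
def pvRaiseWitnessOut_evaluate_situation : Int := -1

def Spec_evaluate_situation (dragons_list : List Int) (knights_list : List Int) (out : Int) : Prop := out = evaluate_situation_alt dragons_list knights_list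
instance (dragons_list : List Int) (knights_list : List Int) (out : Int) : Decidable (Spec_evaluate_situation dragons_list knights_list out) := by unfold Spec_evaluate_situation; infer_instance

-- ===== CLAIM (what is proved, stated in full; the proofs are below) =====
def Claim_equal_evaluate_situation : Prop := ∀ (dragons_list : List Int) (knights_list : List Int), Dom_evaluate_situation dragons_list knights_list → Pre_evaluate_situation dragons_list knights_list → Spec_evaluate_situation dragons_list knights_list (evaluate_situation dragons_list knights_list)

def Claim_raises_evaluate_situation : Prop := (∀ (dragons_list : List Int) (knights_list : List Int), Dom_evaluate_situation dragons_list knights_list → Raises_evaluate_situation dragons_list knights_list → ¬ Pre_evaluate_situation dragons_list knights_list) ∧ (Dom_evaluate_situation (pvRaiseWitness_evaluate_situation.1) (pvRaiseWitness_evaluate_situation.2) ∧ Raises_evaluate_situation (pvRaiseWitness_evaluate_situation.1) (pvRaiseWitness_evaluate_situation.2) ∧ evaluate_situation_alt (pvRaiseWitness_evaluate_situation.1) (pvRaiseWitness_evaluate_situation.2) = pvRaiseWitnessOut_evaluate_situation)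

-- ===== LEMMAS AND PROOFS =====

-- greedy matching count: how many dragons get a knight (same two-pointer as both programs)
def gcount : List Int → List Int → Nat
  | [], _ => 0
  | _ :: _, [] => 0
  | k :: ks, d :: ds => if d ≤ k then 1 + gcount ks ds else gcount ks (d :: ds)

-- B's pass written as recursion over knights with the remaining-dragon suffix as a list
def bRec : List Int → List Int → Int → Int
  | [], ds, t => if ds.length = 0 then t else -1
  | _ :: ks, [], t => bRec ks [] t
  | k :: ks, d :: ds, t => if d ≤ k then bRec ks ds (t + k) else bRec ks (d :: ds) t

theorem bRec_nil_ds : ∀ (ks : List Int) (t : Int), bRec ks [] t = t := by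
  intro ks; induction ks with
  | nil => intro t; simp [bRec]
  | cons k ks ih => intro t; simpa [bRec] using ih t

theorem gcount_le : ∀ (ks ds : List Int), gcount ks ds ≤ ks.length := by
  intro ks; induction ks with
  | nil => intro ds; simp [gcount]
  | cons k ks ih =>
    intro ds; cases ds with
    | nil => simp [gcount]
    | cons d ds =>
      simp only [gcount]; split
      · have := ih ds; simp; omega
      · have := ih (d :: ds); simp; omega

theorem bRec_neg : ∀ (ks ds : List Int) (t : Int), gcount ks ds < ds.length → bRec ks ds t = -1 := by
  intro ks; induction ks with
  | nil =>
    intro ds t h; cases ds with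
    | nil => simp [gcount] at h
    | cons d ds => simp [bRec]
  | cons k ks ih =>
    intro ds t h; cases ds with
    | nil => simp at h
    | cons d ds =>
      simp only [gcount] at h; simp only [bRec]
      split
      · rename_i hk; rw [if_pos hk] at h
        exact ih ds (t + k) (by simp at h ⊢; omega)
      · rename_i hk; rw [if_neg hk] at h
        exact ih (d :: ds) t h

theorem loopA_eq_bRec : ∀ (ks ds : List Int) (t : Int),
    (ds.length = 0 ∨ gcount ks ds ≠ ds.length - 1) → loopA ks ds t = bRec ks ds t := by
  intro ks; induction ks with
  | nil =>
    intro ds t h; cases ds with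
    | nil => simp [loopA, bRec]
    | cons d ds =>
      cases ds with
      | nil => exfalso; simp [gcount] at h
      | cons e es => simp [loopA, bRec]
  | cons k ks ih =>
    intro ds t h; cases ds with
    | nil => simp [loopA, bRec_nil_ds]
    | cons d ds =>
      by_cases hc : ds.length ≤ ks.length + 1
      · by_cases hk : d ≤ k
        · have h' : ds.length = 0 ∨ gcount ks ds ≠ ds.length - 1 := by
            simp only [gcount, if_pos hk, List.length_cons] at h; omega
          simp only [loopA, bRec, if_pos hc, if_pos hk]
          exact ih ds (t + k) h'
        · have h' : (d :: ds).length = 0 ∨ gcount ks (d :: ds) ≠ (d :: ds).length - 1 := by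
            simp only [gcount, if_neg hk] at h; simpa using h
          simp only [loopA, bRec, if_pos hc, if_neg hk]
          exact ih (d :: ds) t h'
      · have hlt2 : gcount (k :: ks) (d :: ds) < (d :: ds).length := by
          have := gcount_le (k :: ks) (d :: ds); simp at this ⊢; omega
        simp only [loopA, if_neg hc]
        exact (bRec_neg _ _ _ hlt2).symm

theorem hallDef_nil : ∀ (ds : List Int), hallDef [] ds = 0 := by
  intro ds; induction ds with
  | nil => simp [hallDef]
  | cons d ds ih => simp [hallDef, ih]

theorem hallDef_mono_cons : ∀ (ds ks : List Int) (k : Int), hallDef ks ds ≤ hallDef (k :: ks) ds := by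
  intro ds; induction ds with
  | nil => intro ks k; simp [hallDef]
  | cons d ds ih =>
    intro ks k
    simp only [hallDef, List.countP_cons]
    have := ih ks k
    split <;> omega

theorem hallDef_cons_lt (k : Int) : ∀ (ds ks : List Int), (∀ x ∈ ds, ¬ x ≤ k) → hallDef (k :: ks) ds = hallDef ks ds := by
  intro ds; induction ds with
  | nil => intro ks _; simp [hallDef]
  | cons d ds ih =>
    intro ks h
    have hd : ¬ d ≤ k := h d (by simp)
    simp only [hallDef, List.countP_cons, ih ks (fun x hx => h x (by simp [hx])), decide_eq_true_eq,
      if_neg hd]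
    simp

theorem countP_antitone (ks : List Int) (d e : Int) (h : d ≤ e) :
    ks.countP (fun k => decide (e ≤ k)) ≤ ks.countP (fun k => decide (d ≤ k)) := by
  apply List.countP_mono_left
  intro a _ ha
  simp only [decide_eq_true_eq] at ha ⊢
  omega

theorem countP_all (ks : List Int) (d : Int) (h : ∀ x ∈ ks, d ≤ x) :
    ks.countP (fun k => decide (d ≤ k)) = ks.length := by
  rw [List.countP_eq_length]
  intro a ha; simpa using h a ha

-- key exchange lemma: adding the minimal knight k to ks and capping by #{knights ≥ d} does not
-- change the Hall defect, for dragons all ≥ d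
theorem hallDef_S (k : Int) (ks : List Int) (hk : ∀ x ∈ ks, k ≤ x) :
    ∀ (d : Int) (ds : List Int), (∀ x ∈ ds, d ≤ x) → ds.Pairwise (· ≤ ·) →
      min (ks.countP (fun x => decide (d ≤ x))) (hallDef (k :: ks) ds) = hallDef ks ds := by
  intro d ds
  induction ds generalizing d with
  | nil => intro _ _; simp [hallDef]
  | cons e es ih =>
    intro hd hp
    have hde : d ≤ e := hd e (by simp)
    have hes : ∀ x ∈ es, e ≤ x := by
      intro x hx; exact (List.pairwise_cons.mp hp).1 x hx
    have hpes : es.Pairwise (· ≤ ·) := (List.pairwise_cons.mp hp).2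
    have ihe := ih e hes hpes
    by_cases hke : e ≤ k
    · -- k ≥ e: every knight is ≥ e ≥ d
      have hallk : ∀ x ∈ ks, e ≤ x := fun x hx => le_trans hke (hk x hx)
      have c1 : ks.countP (fun x => decide (e ≤ x)) = ks.length := countP_all ks e hallk
      have c2 : ks.countP (fun x => decide (d ≤ x)) = ks.length :=
        countP_all ks d (fun x hx => le_trans hde (hallk x hx))
      have hm := hallDef_mono_cons es ks k
      simp only [hallDef, List.countP_cons, decide_eq_true_eq, if_pos hke, c1, c2]
      omega
    · -- k < e
      have c0 : (k :: ks).countP (fun x => decide (e ≤ x)) = ks.countP (fun x => decide (e ≤ x)) := by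
        simp [hke]
      have cle : ks.countP (fun x => decide (e ≤ x)) ≤ ks.countP (fun x => decide (d ≤ x)) :=
        countP_antitone ks d e hde
      have hm := hallDef_mono_cons es ks k
      simp only [hallDef, c0]
      omega

theorem gcount_eq_hallDef : ∀ (ks ds : List Int), ks.Pairwise (· ≤ ·) → ds.Pairwise (· ≤ ·) →
    gcount ks ds = hallDef ks ds := by
  intro ks
  induction ks with
  | nil => intro ds _ _; simp [gcount, hallDef_nil]
  | cons k ks ih =>
    intro ds hks hds
    have hkmin : ∀ x ∈ ks, k ≤ x := fun x hx => (List.pairwise_cons.mp hks).1 x hx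
    have hks' : ks.Pairwise (· ≤ ·) := (List.pairwise_cons.mp hks).2
    cases ds with
    | nil => simp [gcount, hallDef]
    | cons d ds =>
      have hdmin : ∀ x ∈ ds, d ≤ x := fun x hx => (List.pairwise_cons.mp hds).1 x hx
      have hds' : ds.Pairwise (· ≤ ·) := (List.pairwise_cons.mp hds).2
      simp only [gcount]
      by_cases hk : d ≤ k
      · rw [if_pos hk, ih ds hks' hds']
        have hS := hallDef_S k ks hkmin d ds hdmin hds'
        simp only [hallDef, List.countP_cons, decide_eq_true_eq, if_pos hk]
        omega
      · rw [if_neg hk]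
        rw [ih (d :: ds) hks' hds]
        rw [hallDef_cons_lt k (d :: ds) ks]
        intro x hx hxk
        rcases List.mem_cons.mp hx with rfl | hx'
        · exact hk hxk
        · exact hk (le_trans ((List.pairwise_cons.mp hds).1 x hx') hxk)

theorem hallDef_perm {ks₁ ks₂ : List Int} (h : ks₁.Perm ks₂) : ∀ (ds : List Int), hallDef ks₁ ds = hallDef ks₂ ds := by
  intro ds; induction ds with
  | nil => simp [hallDef]
  | cons d ds ih => simp [hallDef, ih, h.countP_eq]

theorem foldB_eq_bRec (ds : List Int) : ∀ (ks : List Int) (i : Nat) (t : Int), i ≤ ds.length →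
    (if (ks.foldl (stepB ds) (i, t)).1 = ds.length then (ks.foldl (stepB ds) (i, t)).2 else -1)
      = bRec ks (ds.drop i) t := by
  intro ks
  induction ks with
  | nil =>
    intro i t hi
    simp only [List.foldl_nil, bRec, List.length_drop]
    split <;> split <;> omega
  | cons k ks ih =>
    intro i t hi
    simp only [List.foldl_cons]
    by_cases hlt : i < ds.length
    · have hdrop : ds.drop i = ds[i] :: ds.drop (i + 1) := List.drop_eq_getElem_cons hlt
      have hgetD : ds.getD i 0 = ds[i] := List.getD_eq_getElem ds 0 hlt
      by_cases hk : ds.getD i 0 ≤ k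
      · have hstep : stepB ds (i, t) k = (i + 1, t + k) := by
          simp only [stepB]; rw [if_pos ⟨hlt, hk⟩]
        rw [hgetD] at hk
        rw [hstep, ih (i + 1) (t + k) (by omega), hdrop, bRec, if_pos hk]
      · have hstep : stepB ds (i, t) k = (i, t) := by
          simp only [stepB]; rw [if_neg (fun hh => hk hh.2)]
        rw [hgetD] at hk
        rw [hstep, ih i t hi, hdrop, bRec, if_neg hk, ← hdrop]
    · have hieq : i = ds.length := by omega
      have hdrop : ds.drop i = [] := by simp [hieq]
      have hstep : stepB ds (i, t) k = (i, t) := by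
        simp only [stepB]; rw [if_neg (fun hh => hlt hh.1)]
      rw [hstep, ih i t hi, hdrop, bRec, ← hdrop]

-- ===== VERDICT (by name: the statement is the Claim_ definition above) =====
theorem evaluate_situation_spec : Claim_equal_evaluate_situation := by
  intro dragons_list knights_list _dom hpre
  unfold Spec_evaluate_situation evaluate_situation evaluate_situation_alt
  by_cases hlen : knights_list.length < dragons_list.length
  · rw [if_pos hlen, if_pos hlen]
  · rw [if_neg hlen, if_neg hlen]
    set sd := PySem.List.sorted dragons_list (fun x => x) false with hsd
    set sk := PySem.List.sorted knights_list (fun x => x) false with hsk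
    have hfold := foldB_eq_bRec sd sk 0 0 (by omega)
    simp only [List.drop_zero] at hfold
    rw [hfold]
    apply loopA_eq_bRec
    have hlsd : sd.length = dragons_list.length := PySem.List.length_sorted ..
    by_cases hz : dragons_list.length = 0
    · left; omega
    · right
      have hpk : sk.Pairwise (· ≤ ·) := by
        have := PySem.List.sorted_pairwise (xs := knights_list) (key := fun x : Int => x)
        simpa using this
      have hpd : sd.Pairwise (· ≤ ·) := by
        have := PySem.List.sorted_pairwise (xs := dragons_list) (key := fun x : Int => x)
        simpa using this
      have hgc : gcount sk sd = hallDef knights_list sd := by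
        rw [gcount_eq_hallDef sk sd hpk hpd]
        exact hallDef_perm (PySem.List.sorted_perm ..) sd
      unfold Pre_evaluate_situation Raises_evaluate_situation at hpre
      push Not at hpre
      rw [hgc, hlsd]
      exact hpre (by omega) (by omega)

def evaluate_situation_raises : Claim_raises_evaluate_situation := by
  unfold Claim_raises_evaluate_situation
  exact ⟨fun _ _ _ hr hp => hp hr, by decide⟩
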